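-- pv_equiv track=rewrite | github.com/Onemorelight20/algorithms-labs-iot | lab-4-wchain/wchain.py | get_words_grouped_by_len_dict
-- ===== SOURCE A (Python) =====
-- def get_words_grouped_by_len_dict(words: list[str]) -> dict[str:list[str]]:
--     sorted_words = sorted(words, key=lambda wrd: len(wrd), reverse=True)
--     words_grouped_by_len_dict = {}
--
--     for word in sorted_words:
--         len_key = len(word)
--         if len_key in words_grouped_by_len_dict:
--             words_grouped_by_len_dict[len_key].append(word)
--         else:
--             words_grouped_by_len_dict[len_key] = [word]
--     return words_grouped_by_len_dict
-- ===== SOURCE B (Python) =====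
-- def get_words_grouped_by_len_dict(words: list[str]) -> dict[str:list[str]]:
--     buckets = {}
--     for word in words:
--         buckets.setdefault(len(word), []).append(word)
--     return {length: buckets[length] for length in sorted(buckets, reverse=True)}
-- ===== Notes on version B (the rewrite author's own statement) =====
-- stated objective: faster
-- what changed: Instead of sorting all n words by length and then grouping, B buckets words by length in one pass (order inside a bucket is preserved, which is exactly what the stable descending sort gave A) and only sorts the distinct length keys descending.
import Mathlib
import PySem

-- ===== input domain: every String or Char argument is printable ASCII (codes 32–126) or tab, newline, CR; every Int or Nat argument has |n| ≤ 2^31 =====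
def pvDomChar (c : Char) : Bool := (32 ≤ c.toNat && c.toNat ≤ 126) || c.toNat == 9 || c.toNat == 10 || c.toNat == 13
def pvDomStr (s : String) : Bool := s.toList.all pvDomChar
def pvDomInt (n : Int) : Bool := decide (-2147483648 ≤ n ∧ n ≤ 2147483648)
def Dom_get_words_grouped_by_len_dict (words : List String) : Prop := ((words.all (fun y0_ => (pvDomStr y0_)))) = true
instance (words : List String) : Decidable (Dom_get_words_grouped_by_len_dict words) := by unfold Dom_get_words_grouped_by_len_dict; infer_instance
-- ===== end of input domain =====

-- B replaces A's sort-all-words-then-group with a single bucketing pass plus a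
-- descending sort of the distinct length keys only.

-- ===== PORT A =====
-- sorted(words, key=len, reverse=True), then group into a dict in that order.
def get_words_grouped_by_len_dict (words : List String) : List (Int × List String) :=
  ((PySem.List.sorted words (fun wrd => PySem.Str.len wrd) true).foldl (fun d word =>
      if d.contains (PySem.Str.len word) then
        d.modify (PySem.Str.len word) [] (fun l => l ++ [word])  -- words_grouped_by_len_dict[len_key].append(word)
      else
        d.insert (PySem.Str.len word) [word]) PySem.Dict.empty).items

-- ===== PORT B =====
-- B's local variable `buckets` as a helper: one modify-append pass over words
-- (buckets.setdefault(len(word), []).append(word) = modify at the key, appending).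
def pvBuckets (words : List String) : PySem.Dict Int (List String) :=
  words.foldl (fun d word => d.modify (PySem.Str.len word) [] (fun l => l ++ [word])) PySem.Dict.empty

-- {k: buckets[k] for k in sorted(buckets, reverse=True)}; buckets[k] never misses
-- since k ranges over the keys, so getD is exact.
def get_words_grouped_by_len_dict_alt (words : List String) : List (Int × List String) :=
  (PySem.List.sorted (pvBuckets words).keys (fun k => k) true).map
    (fun length => (length, (pvBuckets words).getD length []))

-- ===== PRECONDITION & SPEC =====
def Spec_get_words_grouped_by_len_dict (words : List String) (out : List (Int × List String)) : Prop := out = get_words_grouped_by_len_dict_alt words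
instance (words : List String) (out : List (Int × List String)) : Decidable (Spec_get_words_grouped_by_len_dict words out) := by unfold Spec_get_words_grouped_by_len_dict; infer_instance

-- ===== CLAIM (what is proved, stated in full; the proofs are below) =====
def Claim_equal_get_words_grouped_by_len_dict : Prop := ∀ (words : List String), Dom_get_words_grouped_by_len_dict words → Spec_get_words_grouped_by_len_dict words (get_words_grouped_by_len_dict words)

-- ===== LEMMAS AND PROOFS =====

-- A's if/else branch is exactly one `modify` (on a fresh key, modify inserts [] ++ [word]).
theorem pvStepA (d : PySem.Dict Int (List String)) (w : String) :
    (if d.contains (PySem.Str.len w) then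
        d.modify (PySem.Str.len w) [] (fun l => l ++ [w])
      else
        d.insert (PySem.Str.len w) [w])
    = d.modify (PySem.Str.len w) [] (fun l => l ++ [w]) := by
  by_cases h : d.contains (PySem.Str.len w) = true
  · rw [if_pos h]
  · simp only [Bool.not_eq_true] at h
    rw [if_neg (by rw [h]; simp)]
    show d.insert (PySem.Str.len w) [w]
        = d.insert (PySem.Str.len w) (d.getD (PySem.Str.len w) [] ++ [w])
    rw [PySem.Dict.getD_of_not_contains _ _ h, List.nil_append]

theorem pvBuckets_eq (l : List String) :
    List.foldl (fun d word => d.modify (PySem.Str.len word) [] (fun s => s ++ [word]))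
      (PySem.Dict.empty : PySem.Dict Int (List String)) l = pvBuckets l := rfl

-- The bucket the modify-append loop leaves at key c is the filter of its input.
theorem pvGetD_buckets (l : List String) (c : Int) :
    (pvBuckets l).getD c [] = l.filter (fun w => PySem.Str.len w == c) := by
  have h := PySem.Dict.getD_foldl_modify_append
      (l.map (fun w => (PySem.Str.len w, w))) (PySem.Dict.empty : PySem.Dict Int (List String)) c
  rw [List.foldl_map] at h
  unfold pvBuckets
  simpa [Function.comp_def, List.filter_map, List.map_map, PySem.Dict.getD_empty] using h

-- Its keys are the distinct lengths in first-appearance order.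
theorem pvKeys_buckets (l : List String) :
    (pvBuckets l).keys = PySem.Set.ofList (l.map (fun w => PySem.Str.len w)) := by
  have h := PySem.Dict.keys_foldl_modify_key l (fun w => PySem.Str.len w) ([] : List String)
      (fun _ w => fun a => a ++ [w]) PySem.Dict.empty
  unfold pvBuckets
  simpa [PySem.Dict.keys_empty, PySem.Set.update, PySem.Set.ofList] using h

theorem pvNodup_keys_buckets (l : List String) : (pvBuckets l).keys.Nodup := by
  exact PySem.Dict.nodup_keys_foldl_modify_key l (fun w => PySem.Str.len w) ([] : List String)
      (fun _ w => fun a => a ++ [w]) PySem.Dict.empty PySem.Dict.nodup_keys_empty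

-- Inserting an element whose key misses c does not change the filter at c.
theorem pvFilter_insertBy_neg {α : Type} (b : α → α → Bool) (p : α → Bool) (x : α) (s : List α)
    (hx : p x = false) :
    (PySem.List.insertBy b x s).filter p = s.filter p := by
  induction s with
  | nil => simp [PySem.List.insertBy, hx]
  | cons y ys ih =>
    by_cases h : b x y = true
    · simp [PySem.List.insertBy, h, hx]
    · simp only [Bool.not_eq_true] at h
      rw [show PySem.List.insertBy b x (y :: ys) = y :: PySem.List.insertBy b x ys by
        simp [PySem.List.insertBy, h]]
      rw [List.filter_cons, List.filter_cons, ih]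

-- Into a descending list, an element of key c lands after every key-c element.
theorem pvFilter_insertBy_pos {α : Type} (key : α → Int) (c : Int) (x : α) (s : List α)
    (hs : s.Pairwise (fun a b => key b ≤ key a)) (hx : key x = c) :
    (PySem.List.insertBy (fun a b => decide (key b < key a)) x s).filter (fun w => key w == c)
    = s.filter (fun w => key w == c) ++ [x] := by
  induction s with
  | nil => simp [PySem.List.insertBy, hx]
  | cons y ys ih =>
    rcases List.pairwise_cons.mp hs with ⟨hy, hys⟩
    by_cases h : key y < key x
    · have hins : PySem.List.insertBy (fun a b => decide (key b < key a)) x (y :: ys)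
          = x :: y :: ys := by
        simp [PySem.List.insertBy, h]
      have hf : List.filter (fun w => key w == c) (y :: ys) = [] := by
        apply List.filter_eq_nil_iff.mpr
        intro w hw
        rcases List.mem_cons.mp hw with rfl | hw'
        · simp only [beq_iff_eq]; omega
        · have := hy w hw'; simp only [beq_iff_eq]; omega
      rw [hins, List.filter_cons, hf]
      simp [hx]
    · have hins : PySem.List.insertBy (fun a b => decide (key b < key a)) x (y :: ys)
          = y :: PySem.List.insertBy (fun a b => decide (key b < key a)) x ys := by
        simp [PySem.List.insertBy, h]
      rw [hins, List.filter_cons, List.filter_cons, ih hys]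
      by_cases hy' : (key y == c) = true <;> simp [hy']

-- STABILITY: filtering a stable descending sort by one key value gives the original order.
theorem pvFilter_sorted {α : Type} (key : α → Int) (xs : List α) (c : Int) :
    (PySem.List.sorted xs key true).filter (fun w => key w == c)
    = xs.filter (fun w => key w == c) := by
  induction xs using List.reverseRecOn with
  | nil => simp [PySem.List.sorted_rev_eq_foldl_insertBy]
  | append_singleton xs x ih =>
    have hins : PySem.List.sorted (xs ++ [x]) key true
        = PySem.List.insertBy (fun a b => decide (key b < key a)) x (PySem.List.sorted xs key true) := by
      rw [PySem.List.sorted_rev_eq_foldl_insertBy, PySem.List.sorted_rev_eq_foldl_insertBy,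
        List.foldl_append]
      rfl
    rw [hins, List.filter_append]
    by_cases hx : key x = c
    · rw [pvFilter_insertBy_pos key c x _ (PySem.List.sorted_pairwise_rev xs key) hx, ih]
      simp [hx]
    · rw [pvFilter_insertBy_neg _ _ _ _ (by simpa using hx), ih]
      simp [hx]

-- First occurrences of a descending list are strictly descending.
theorem pvOfList_pairwise_gt (l : List Int) (h : l.Pairwise (fun a b => b ≤ a)) :
    (PySem.Set.ofList l).Pairwise (fun a b : Int => b < a) := by
  induction l using List.reverseRecOn with
  | nil => simp [PySem.Set.ofList, PySem.Set.empty]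
  | append_singleton l x ih =>
    rw [List.pairwise_append] at h
    have hadd : PySem.Set.ofList (l ++ [x]) = PySem.Set.add (PySem.Set.ofList l) x := by
      simp [PySem.Set.ofList, List.foldl_append]
    rw [hadd]
    by_cases hc : PySem.Set.contains (PySem.Set.ofList l) x = true
    · rw [show PySem.Set.add (PySem.Set.ofList l) x = PySem.Set.ofList l from by
        simp only [PySem.Set.add]; rw [if_pos hc]]
      exact ih h.1
    · have hxmem : x ∉ PySem.Set.ofList l := by
        intro hm
        rw [PySem.Set.contains_iff] at hc
        exact hc hm
      have hxl : x ∉ l := fun hm => hxmem ((PySem.Set.mem_ofList l x).mpr hm)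
      rw [show PySem.Set.add (PySem.Set.ofList l) x = PySem.Set.ofList l ++ [x] from by
        simp only [PySem.Set.add]
        rw [if_neg hc]]
      rw [List.pairwise_append]
      refine ⟨ih h.1, by simp, ?_⟩
      intro a ha b hb
      have hb' : b = x := by simpa using hb
      have hal : a ∈ l := (PySem.Set.mem_ofList l a).mp ha
      have hle : x ≤ a := h.2.2 a hal x (by simp)
      have hne : a ≠ x := fun e => hxl (e ▸ hal)
      rw [hb']
      omega

-- ===== VERDICT (by name: the statement is the Claim_ definition above) =====
theorem get_words_grouped_by_len_dict_spec : Claim_equal_get_words_grouped_by_len_dict := by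
  intro words _
  unfold Spec_get_words_grouped_by_len_dict
  unfold get_words_grouped_by_len_dict get_words_grouped_by_len_dict_alt
  have hstep : (fun (d : PySem.Dict Int (List String)) (word : String) =>
      if d.contains (PySem.Str.len word) then
        d.modify (PySem.Str.len word) [] (fun l => l ++ [word])
      else
        d.insert (PySem.Str.len word) [word])
      = (fun d word => d.modify (PySem.Str.len word) [] (fun l => l ++ [word])) :=
    funext fun d => funext fun w => pvStepA d w
  rw [hstep]
  set S := PySem.List.sorted words (fun wrd => PySem.Str.len wrd) true with hS
  rw [pvBuckets_eq S]
  rw [PySem.Dict.items_eq_map_keys _ (pvNodup_keys_buckets S) []]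
  rw [pvKeys_buckets S, pvKeys_buckets words]
  have hkeys : PySem.Set.ofList (S.map (fun w => PySem.Str.len w))
      = PySem.List.sorted (PySem.Set.ofList (words.map (fun w => PySem.Str.len w))) (fun k => k) true := by
    refine (PySem.List.sorted_rev_eq_of_perm_of_pairwise_gt _ _ _ ?_ ?_).symm
    · refine (List.perm_ext_iff_of_nodup (PySem.Set.nodup_ofList _) (PySem.Set.nodup_ofList _)).mpr ?_
      intro a
      simp only [PySem.Set.mem_ofList, List.mem_map, hS]
      constructor
      · rintro ⟨w, hw, rfl⟩; exact ⟨w, (PySem.List.mem_sorted _ _ _ _).mp hw, rfl⟩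
      · rintro ⟨w, hw, rfl⟩; exact ⟨w, (PySem.List.mem_sorted _ _ _ _).mpr hw, rfl⟩
    · exact pvOfList_pairwise_gt _
        (List.pairwise_map.mpr (PySem.List.sorted_pairwise_rev words (fun w => PySem.Str.len w)))
  rw [hkeys]
  have hvals : (fun k : Int => (k, (pvBuckets S).getD k []))
      = (fun length : Int => (length, (pvBuckets words).getD length [])) := by
    funext k
    rw [pvGetD_buckets S k, pvGetD_buckets words k, hS,
      pvFilter_sorted (fun w => PySem.Str.len w) words k]
  rw [hvals]
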